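-- pv_equiv track=rewrite | github.com/sztaszek321/Algorithms-and-Data-Structures | GraphAlgorithms/graph_coloring_SL.py | count_degree
-- ===== SOURCE A (Python) =====
-- def count_degree(edges):
--     count = dict()
--     for u, v in edges:
--         if u in count:
--             count[u][0] += 1
--             count[u].append(v)
--         else:
--             count[u] = [1, v]
--         if v in count:
--             count[v][0] += 1
--             count[v].append(u)
--         else:
--             count[v] = [1, u]
--     return dict(sorted(count.items(), key=lambda item: item[1][0]))
-- ===== SOURCE B (Python) =====
-- def count_degree(edges):
--     # Group-by via filtering: no dict mutation, no running counters.
--     stream = [(a, b) for u, v in edges for a, b in ((u, v), (v, u))]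
--     def nbrs(k):
--         return [b for a, b in stream if a == k]
--     keys = sorted(dict.fromkeys(a for a, _ in stream), key=lambda k: len(nbrs(k)))
--     return {k: [len(nbrs(k))] + nbrs(k) for k in keys}
-- ===== Notes on version B (the rewrite author's own statement) =====
-- stated objective: alternative
-- what changed: B replaces A's incremental dict mutation (in-place counter bump and append per edge endpoint) with a group-by formulation: flatten edges to a directed stream, dedup the endpoints for the key order, and compute each vertex's neighbour list by filtering the whole stream, deriving the degree as its length.
import Mathlib
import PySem

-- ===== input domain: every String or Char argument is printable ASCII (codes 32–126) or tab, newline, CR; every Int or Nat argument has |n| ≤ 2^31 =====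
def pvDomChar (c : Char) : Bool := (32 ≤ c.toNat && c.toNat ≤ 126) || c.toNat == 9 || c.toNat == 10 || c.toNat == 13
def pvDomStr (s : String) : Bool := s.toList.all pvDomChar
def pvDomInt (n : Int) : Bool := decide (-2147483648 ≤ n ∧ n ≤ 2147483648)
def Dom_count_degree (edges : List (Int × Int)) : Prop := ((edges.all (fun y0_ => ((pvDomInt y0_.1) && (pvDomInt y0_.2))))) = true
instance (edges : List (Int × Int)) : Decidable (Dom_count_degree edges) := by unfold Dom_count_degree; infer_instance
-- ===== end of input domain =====

-- B replaces A's incremental dict mutation with a group-by: it flattens the edges into a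
-- directed stream, dedups the endpoints, and filters the stream per vertex (degree = list length).

-- ===== PORT A =====
-- `count[k][0] += 1; count[k].append(w)` on the stored list; the stored lists are always
-- nonempty (created as [1, v]), so the [] branch is unreachable.
def cdBump (l : List Int) (w : Int) : List Int :=
  match l with
  | c :: rest => (c + 1) :: (rest ++ [w])
  | [] => []

-- one `if k in count: … else: count[k] = [1, w]` block of A's loop body
def cdStepA (d : PySem.Dict Int (List Int)) (k w : Int) : PySem.Dict Int (List Int) :=
  if d.contains k then d.insert k (cdBump (d.getD k []) w)
  else d.insert k [1, w]

def count_degree (edges : List (Int × Int)) : List (Int × List Int) :=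
  let count := edges.foldl (fun d p => cdStepA (cdStepA d p.1 p.2) p.2 p.1) PySem.Dict.empty
  -- key=lambda item: item[1][0]; every stored list is nonempty, so item[1][0] = headD 0
  PySem.List.sorted count.items (fun it => it.2.headD 0) false

-- ===== PORT B =====
-- stream = [(a, b) for u, v in edges for a, b in ((u, v), (v, u))]
def cdStream (edges : List (Int × Int)) : List (Int × Int) :=
  edges.flatMap (fun p => [(p.1, p.2), (p.2, p.1)])

-- def nbrs(k): return [b for a, b in stream if a == k]
def cdNbrs (stream : List (Int × Int)) (k : Int) : List Int :=
  (stream.filter (fun q => q.1 == k)).map (fun q => q.2)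

def count_degree_alt (edges : List (Int × Int)) : List (Int × List Int) :=
  let stream := cdStream edges
  -- dict.fromkeys(a for a, _ in stream) = ordered dedup
  let keys := PySem.List.dedup (stream.map (fun q => q.1))
  -- sorted(..., key=lambda k: len(nbrs(k)))
  let skeys := PySem.List.sorted keys (fun k => ((cdNbrs stream k).length : Int)) false
  -- {k: [len(nbrs(k))] + nbrs(k) for k in skeys}; skeys has distinct keys, so this is a map
  skeys.map (fun k => (k, ((cdNbrs stream k).length : Int) :: cdNbrs stream k))

-- ===== PRECONDITION & SPEC =====
def Spec_count_degree (edges : List (Int × Int)) (out : List (Int × List Int)) : Prop := out = count_degree_alt edges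
instance (edges : List (Int × Int)) (out : List (Int × List Int)) : Decidable (Spec_count_degree edges out) := by unfold Spec_count_degree; infer_instance

-- ===== CLAIM =====
def Claim_equal_count_degree : Prop := ∀ (edges : List (Int × Int)), Dom_count_degree edges → Spec_count_degree edges (count_degree edges)

-- ===== LEMMAS AND PROOFS =====

-- A's per-edge double step is exactly a single step per element of the flattened stream
lemma cd_fold_stream (edges : List (Int × Int)) (d : PySem.Dict Int (List Int)) :
    edges.foldl (fun d p => cdStepA (cdStepA d p.1 p.2) p.2 p.1) d =
    (cdStream edges).foldl (fun d q => cdStepA d q.1 q.2) d := by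
  induction edges generalizing d with
  | nil => rfl
  | cons p rest ih =>
    simp only [List.foldl_cons, cdStream, List.flatMap_cons, List.foldl_append] at *
    exact ih _

lemma cd_dedup_append_singleton (l : List Int) (a : Int) :
    PySem.List.dedup (l ++ [a]) =
      if a ∈ l then PySem.List.dedup l else PySem.List.dedup l ++ [a] := by
  by_cases h : a ∈ l
  · simp only [PySem.List.dedup, PySem.Set.ofList, List.foldl_append, List.foldl_cons,
      List.foldl_nil, PySem.Set.add, if_pos h]
    rw [if_pos]
    have : a ∈ PySem.Set.ofList l := (PySem.Set.mem_ofList l a).mpr h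
    simpa [PySem.Set.ofList] using this
  · simp only [PySem.List.dedup, PySem.Set.ofList, List.foldl_append, List.foldl_cons,
      List.foldl_nil, PySem.Set.add, if_neg h]
    rw [if_neg]
    intro hc
    have : a ∈ PySem.Set.ofList l := by
      simpa [PySem.Set.ofList] using (List.mem_of_elem_eq_true hc)
    exact h ((PySem.Set.mem_ofList l a).mp this)

lemma cd_nbrs_append_singleton (s : List (Int × Int)) (q : Int × Int) (k : Int) :
    cdNbrs (s ++ [q]) k = if q.1 = k then cdNbrs s k ++ [q.2] else cdNbrs s k := by
  by_cases h : q.1 = k <;> simp [cdNbrs, List.filter_append, h]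

lemma cd_nbrs_of_not_mem (s : List (Int × Int)) (k : Int) (h : k ∉ s.map (fun q => q.1)) :
    cdNbrs s k = [] := by
  simp only [cdNbrs, List.map_eq_nil_iff]
  rw [List.filter_eq_nil_iff]
  intro q hq hk
  exact h (List.mem_map.mpr ⟨q, hq, (by simpa using hk)⟩)

-- loop invariant: after processing the stream prefix s, A's dict has the dedup'd endpoints of s
-- as keys and, at each key, the length-prefixed filtered neighbour list of s
def cdInv (d : PySem.Dict Int (List Int)) (s : List (Int × Int)) : Prop :=
  d.keys = PySem.List.dedup (s.map (fun q => q.1)) ∧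
  ∀ k ∈ d.keys, d.getD k [] = ((cdNbrs s k).length : Int) :: cdNbrs s k

lemma cd_step (d : PySem.Dict Int (List Int)) (s : List (Int × Int)) (h : cdInv d s)
    (q : Int × Int) : cdInv (cdStepA d q.1 q.2) (s ++ [q]) := by
  obtain ⟨hkeys, hval⟩ := h
  have hmem : ∀ j : Int, d.contains j = true ↔ j ∈ s.map (fun q => q.1) := by
    intro j
    rw [PySem.Dict.contains_eq_decide_mem_keys, hkeys]
    simp
  have hmap : (s ++ [q]).map (fun q => q.1) = s.map (fun q => q.1) ++ [q.1] := by simp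
  by_cases hc : d.contains q.1 = true
  · have hq1 : q.1 ∈ s.map (fun q => q.1) := (hmem q.1).mp hc
    constructor
    · rw [cdStepA, if_pos hc, PySem.Dict.keys_insert_of_contains _ _ hc, hkeys, hmap,
        cd_dedup_append_singleton, if_pos hq1]
    · intro k hk
      rw [cdStepA, if_pos hc] at hk ⊢
      rw [PySem.Dict.getD_insert, cd_nbrs_append_singleton]
      by_cases hkq : k = q.1
      · rw [if_pos hkq, if_pos (hkq.symm), hval q.1 (by
          rw [PySem.Dict.contains_eq_decide_mem_keys] at hc; exact of_decide_eq_true hc),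
          cdBump, hkq]
        simp
      · rw [if_neg hkq, if_neg (fun hh => hkq hh.symm)]
        refine hval k ?_
        rw [PySem.Dict.keys_insert_of_contains _ _ hc] at hk
        exact hk
  · have hc' : d.contains q.1 = false := by
      cases hcb : d.contains q.1 with
      | false => rfl
      | true => exact absurd hcb hc
    have hq1 : q.1 ∉ s.map (fun q => q.1) := fun hh => hc ((hmem q.1).mpr hh)
    constructor
    · rw [cdStepA, if_neg (by simp [hc']), PySem.Dict.keys_insert_of_not_contains _ _ hc',
        hkeys, hmap, cd_dedup_append_singleton, if_neg hq1]
    · intro k hk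
      rw [cdStepA, if_neg (by simp [hc'])] at hk ⊢
      rw [PySem.Dict.getD_insert, cd_nbrs_append_singleton]
      by_cases hkq : k = q.1
      · rw [if_pos hkq, if_pos (hkq.symm), hkq, cd_nbrs_of_not_mem s q.1 hq1]
        simp
      · rw [if_neg hkq, if_neg (fun hh => hkq hh.symm)]
        refine hval k ?_
        rw [PySem.Dict.keys_insert_of_not_contains _ _ hc'] at hk
        rcases List.mem_append.mp hk with h1 | h1
        · exact h1
        · exact absurd (List.mem_singleton.mp h1) hkq

lemma cd_fold_inv (s : List (Int × Int)) :
    cdInv (s.foldl (fun d q => cdStepA d q.1 q.2) PySem.Dict.empty) s := by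
  induction s using List.reverseRecOn with
  | nil =>
    constructor
    · simp [PySem.List.dedup, PySem.Set.ofList, PySem.Dict.empty, PySem.Set.empty,
        PySem.Dict.keys]
    · intro k hk
      simp [PySem.Dict.keys, PySem.Dict.empty] at hk
  | append_singleton s' q ih =>
    rw [List.foldl_append, List.foldl_cons, List.foldl_nil]
    exact cd_step _ _ ih q

-- stable sort commutes with mapping an element transformation under a transported key
lemma cd_insertBy_map {α β : Type} (f : α → β) (g : β → Int) (x : α) (ys : List α) :
    PySem.List.insertBy (fun a b => decide (g a < g b)) (f x) (ys.map f) =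
    (PySem.List.insertBy (fun a b => decide (g (f a) < g (f b))) x ys).map f := by
  induction ys with
  | nil => rfl
  | cons y t ih =>
    simp only [List.map_cons, PySem.List.insertBy]
    by_cases h : g (f x) < g (f y)
    · simp [h]
    · simp [h, ih]

lemma cd_sorted_map {α β : Type} (l : List α) (f : α → β) (g : β → Int) :
    PySem.List.sorted (l.map f) g false =
    (PySem.List.sorted l (fun x => g (f x)) false).map f := by
  rw [PySem.List.sorted_eq_foldl_insertBy, PySem.List.sorted_eq_foldl_insertBy, List.foldl_map]
  induction l using List.reverseRecOn with
  | nil => rfl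
  | append_singleton t x ih =>
    rw [List.foldl_append, List.foldl_append, List.foldl_cons, List.foldl_cons,
      List.foldl_nil, List.foldl_nil, ih, cd_insertBy_map]

-- ===== VERDICT =====
theorem count_degree_spec : Claim_equal_count_degree := by
  intro edges _
  unfold Spec_count_degree count_degree count_degree_alt
  dsimp only
  rw [cd_fold_stream]
  obtain ⟨hkeys, hval⟩ := cd_fold_inv (cdStream edges)
  set s := cdStream edges with hs
  set dA := s.foldl (fun d q => cdStepA d q.1 q.2) PySem.Dict.empty with hdA
  have hnd : dA.keys.Nodup := hkeys ▸ PySem.List.nodup_dedup _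
  rw [PySem.Dict.items_eq_map_keys dA hnd []]
  have hitems : dA.keys.map (fun k => (k, dA.getD k [])) =
      dA.keys.map (fun k => (k, ((cdNbrs s k).length : Int) :: cdNbrs s k)) :=
    List.map_congr_left (fun k hk => by rw [hval k hk])
  rw [hitems, hkeys,
    cd_sorted_map _ (fun k => (k, ((cdNbrs s k).length : Int) :: cdNbrs s k))
      (fun it => it.2.headD 0)]
  simp only [List.headD_cons]
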